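-- pv_equiv track=rewrite | github.com/paiml/depyler | examples/hard_db_btree.py | btree_height
-- ===== SOURCE A (Python) =====
-- def btree_height(num_keys: int, order: int) -> int:
--     if num_keys <= 0 or order <= 1:
--         return 0
--     height: int = 0
--     capacity: int = 1
--     while capacity < num_keys:
--         capacity = capacity * order
--         height = height + 1
--     return height
-- ===== SOURCE B (Python) =====
-- def btree_height(num_keys: int, order: int) -> int:
--     if num_keys <= 0 or order <= 1:
--         return 0
--     n = num_keys
--     height = 0
--     while n > 1:
--         n = (n + order - 1) // order
--         height += 1
--     return height
-- ===== Notes on version B (the rewrite author's own statement) =====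
-- stated objective: alternative
-- what changed: A grows a capacity (capacity *= order) until it reaches num_keys; B instead counts down the remaining key count with ceiling division (n = (n + order - 1) // order) until it reaches 1, a divide-down rather than multiply-up loop.
import Mathlib
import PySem

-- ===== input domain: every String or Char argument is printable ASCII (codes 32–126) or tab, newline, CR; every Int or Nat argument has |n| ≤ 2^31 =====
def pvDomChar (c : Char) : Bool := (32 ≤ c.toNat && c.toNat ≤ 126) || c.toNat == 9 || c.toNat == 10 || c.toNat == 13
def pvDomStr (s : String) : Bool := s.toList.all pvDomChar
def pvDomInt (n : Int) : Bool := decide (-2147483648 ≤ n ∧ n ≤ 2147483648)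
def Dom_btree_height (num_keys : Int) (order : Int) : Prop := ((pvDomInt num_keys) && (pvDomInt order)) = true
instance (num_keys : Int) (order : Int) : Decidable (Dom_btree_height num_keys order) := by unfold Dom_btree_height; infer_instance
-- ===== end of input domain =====

-- B replaces A's multiply-up capacity loop by a divide-down loop (ceiling-dividing the
-- remaining key count by `order` each step); alternative decomposition, same O(log n) cost.

-- ===== PORT A =====
-- A's while loop: capacity starts at 1 and is multiplied by `order` while capacity < num_keys;
-- the hypotheses 2 ≤ order, 1 ≤ capacity only justify termination.
def btreeLoopA (num_keys order : Int) (ho : 2 ≤ order) (capacity : Int) (hc : 1 ≤ capacity) (height : Int) : Int :=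
  if h : capacity < num_keys then
    btreeLoopA num_keys order ho (capacity * order) (by nlinarith) (height + 1)
  else
    height
termination_by (num_keys - capacity).toNat
decreasing_by
  have hco : capacity + 1 ≤ capacity * order := by nlinarith
  omega

def btree_height (num_keys : Int) (order : Int) : Int :=
  if h : num_keys ≤ 0 ∨ order ≤ 1 then 0
  else btreeLoopA num_keys order (by omega) 1 (by norm_num) 0

-- ===== PORT B =====
-- ceiling division (n + order - 1) // order, as in Source B
def pvCeilDiv (a b : Int) : Int := PySem.Int.floordiv (a + b - 1) b

-- bracket characterisation of pvCeilDiv (used for termination of loopB and in the proofs)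
theorem pvCeilDiv_spec (a b : Int) (hb : 0 < b) :
    (pvCeilDiv a b - 1) * b < a ∧ a ≤ pvCeilDiv a b * b := by
  have h1 : pvCeilDiv a b * b ≤ a + b - 1 :=
    (PySem.Int.le_floordiv_iff_mul_le hb).mp (le_refl _)
  have h2 : a + b - 1 < (pvCeilDiv a b + 1) * b :=
    (PySem.Int.floordiv_lt_iff_lt_mul hb).mp (by unfold pvCeilDiv; omega)
  constructor <;> nlinarith

theorem pvCeilDiv_pos (a b : Int) (ha : 1 ≤ a) (hb : 0 < b) : 1 ≤ pvCeilDiv a b := by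
  obtain ⟨h1, h2⟩ := pvCeilDiv_spec a b hb
  nlinarith

theorem pvCeilDiv_lt (a b : Int) (ha : 2 ≤ a) (hb : 2 ≤ b) : pvCeilDiv a b < a := by
  obtain ⟨h1, h2⟩ := pvCeilDiv_spec a b (by omega)
  nlinarith

-- B's while loop: n starts at num_keys and is ceiling-divided by `order` while 1 < n.
def btreeLoopB (order : Int) (ho : 2 ≤ order) (n : Int) (hn : 1 ≤ n) (height : Int) : Int :=
  if h : 1 < n then
    btreeLoopB order ho (pvCeilDiv n order) (pvCeilDiv_pos n order hn (by omega)) (height + 1)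
  else
    height
termination_by n.toNat
decreasing_by
  have := pvCeilDiv_lt n order (by omega) ho
  have := pvCeilDiv_pos n order hn (by omega)
  omega

def btree_height_alt (num_keys : Int) (order : Int) : Int :=
  if h : num_keys ≤ 0 ∨ order ≤ 1 then 0
  else btreeLoopB order (by omega) num_keys (by omega) 0

-- ===== PRECONDITION & SPEC =====
def Spec_btree_height (num_keys : Int) (order : Int) (out : Int) : Prop := out = btree_height_alt num_keys order
instance (num_keys : Int) (order : Int) (out : Int) : Decidable (Spec_btree_height num_keys order out) := by unfold Spec_btree_height; infer_instance

-- ===== CLAIM (what is proved, stated in full; the proofs are below) =====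
def Claim_equal_btree_height : Prop := ∀ (num_keys : Int) (order : Int), Dom_btree_height num_keys order → Spec_btree_height num_keys order (btree_height num_keys order)

-- ===== LEMMAS AND PROOFS =====

theorem pvCeilDiv_eq (a b q : Int) (hb : 0 < b) (h1 : (q - 1) * b < a) (h2 : a ≤ q * b) :
    pvCeilDiv a b = q := by
  obtain ⟨c1, c2⟩ := pvCeilDiv_spec a b hb
  have hle : pvCeilDiv a b ≤ q := by nlinarith
  have hge : q ≤ pvCeilDiv a b := by nlinarith
  omega

theorem pvCeilDiv_one (a : Int) : pvCeilDiv a 1 = a :=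
  pvCeilDiv_eq a 1 a (by norm_num) (by omega) (by omega)

-- nested ceiling: ⌈⌈a/b⌉/c⌉ = ⌈a/(b*c)⌉
theorem pvCeilDiv_ceilDiv (a b c : Int) (hb : 0 < b) (hc : 0 < c) :
    pvCeilDiv (pvCeilDiv a b) c = pvCeilDiv a (b * c) := by
  obtain ⟨s1, s2⟩ := pvCeilDiv_spec a b hb
  obtain ⟨t1, t2⟩ := pvCeilDiv_spec (pvCeilDiv a b) c hc
  refine (pvCeilDiv_eq a (b * c) (pvCeilDiv (pvCeilDiv a b) c) (by positivity) ?_ ?_).symm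
  · nlinarith
  · nlinarith

theorem btreeLoopB_congr (order : Int) (ho : 2 ≤ order) (n n' : Int) (hn : 1 ≤ n)
    (hn' : 1 ≤ n') (height : Int) (h : n = n') :
    btreeLoopB order ho n hn height = btreeLoopB order ho n' hn' height := by
  subst h; rfl

theorem pvCeilDiv_eq_one (a b : Int) (ha : 1 ≤ a) (hab : a ≤ b) : pvCeilDiv a b = 1 :=
  pvCeilDiv_eq a b 1 (by omega) (by omega) (by omega)

theorem pvCeilDiv_gt_one (a b : Int) (hb : 1 ≤ b) (hab : b < a) : 1 < pvCeilDiv a b := by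
  obtain ⟨h1, h2⟩ := pvCeilDiv_spec a b (by omega)
  nlinarith

-- simulation: A's loop from `capacity` equals B's loop from ⌈num_keys / capacity⌉
theorem loopA_eq_loopB (num_keys order : Int) (ho : 2 ≤ order) (hnk : 1 ≤ num_keys)
    (capacity : Int) (hc : 1 ≤ capacity) (height : Int) :
      btreeLoopA num_keys order ho capacity hc height
        = btreeLoopB order ho (pvCeilDiv num_keys capacity)
            (pvCeilDiv_pos num_keys capacity hnk (by omega)) height := by
  by_cases h : capacity < num_keys
  · rw [btreeLoopA, dif_pos h, btreeLoopB,
      dif_pos (pvCeilDiv_gt_one num_keys capacity hc h)]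
    have hco : capacity + 1 ≤ capacity * order := by nlinarith
    have hrec := loopA_eq_loopB num_keys order ho hnk (capacity * order) (by nlinarith) (height + 1)
    rw [hrec]
    exact btreeLoopB_congr order ho _ _ _ _ (height + 1)
      (pvCeilDiv_ceilDiv num_keys capacity order (by omega) (by omega)).symm
  · rw [btreeLoopA, dif_neg h, btreeLoopB,
      dif_neg (by have := pvCeilDiv_eq_one num_keys capacity hnk (by omega); omega)]
termination_by (num_keys - capacity).toNat
decreasing_by
  have hco : capacity + 1 ≤ capacity * order := by nlinarith
  omega

-- ===== VERDICT (by name: the statement is the Claim_ definition above) =====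
theorem btree_height_spec : Claim_equal_btree_height := by
  intro num_keys order _
  unfold Spec_btree_height btree_height btree_height_alt
  by_cases h : num_keys ≤ 0 ∨ order ≤ 1
  · rw [dif_pos h, dif_pos h]
  · rw [dif_neg h, dif_neg h]
    rw [loopA_eq_loopB num_keys order (by omega) (by omega) 1 (by norm_num) 0]
    exact btreeLoopB_congr _ _ _ _ _ (by omega) 0 (pvCeilDiv_one num_keys)
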